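-- pv_equiv track=rewrite | github.com/e0xextazy/vad_webrtc | vad/vad.py | smooth_spoken_frames
-- ===== SOURCE A (Python) =====
-- def smooth_spoken_frames(spoken_frames, min_frames_in_silence, min_frames_in_speech):
--     n_frames = len(spoken_frames)
--     prev_speech_pos = -1
--     for frame_ind in range(n_frames):
--         if spoken_frames[frame_ind]:
--             if prev_speech_pos >= 0:
--                 if (prev_speech_pos + 1) < frame_ind:
--                     spoken_frames[(prev_speech_pos + 1):frame_ind] = [True] * \
--                         (frame_ind - prev_speech_pos - 1)
--             prev_speech_pos = frame_ind
--         else: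
--             if prev_speech_pos >= 0:
--                 if (frame_ind - prev_speech_pos) > min_frames_in_silence:
--                     prev_speech_pos = -1
--     if prev_speech_pos >= 0:
--         if (prev_speech_pos + 1) < n_frames:
--             spoken_frames[(prev_speech_pos + 1):n_frames] = [True] * \
--                 (n_frames - prev_speech_pos - 1)
--     speech_start = -1
--     for frame_ind in range(n_frames):
--         if spoken_frames[frame_ind]:
--             if speech_start < 0:
--                 speech_start = frame_ind
--         else:
--             if speech_start >= 0:
--                 if (frame_ind - speech_start) >= min_frames_in_speech:
--                     yield (speech_start, frame_ind)
--                 speech_start = -1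
--     if speech_start >= 0:
--         if (n_frames - speech_start) >= min_frames_in_speech:
--             yield (speech_start, n_frames)
-- ===== SOURCE B (Python) =====
-- def smooth_spoken_frames(spoken_frames, min_frames_in_silence, min_frames_in_speech):
--     # Single fused pass: no in-place gap filling, no second scan.
--     # A "chain" is a speech run together with the short silences inside it;
--     # it dies once pending silence exceeds min_frames_in_silence.
--     # Return-value equivalent to A; does NOT mutate spoken_frames.
--     chain_start = -1
--     last_true = -1
--     pending = 0
--     i = 0
--     for v in spoken_frames:
--         if v:
--             if chain_start < 0:
--                 chain_start = i
--             last_true = i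
--             pending = 0
--         elif chain_start >= 0:
--             pending += 1
--             if pending > min_frames_in_silence:
--                 if last_true + 1 - chain_start >= min_frames_in_speech:
--                     yield (chain_start, last_true + 1)
--                 chain_start = -1
--                 pending = 0
--         i += 1
--     n = i
--     if chain_start >= 0 and n - chain_start >= min_frames_in_speech:
--         yield (chain_start, n)
-- ===== Notes on version B (the rewrite author's own statement) =====
-- stated objective: alternative
-- what changed: replaces A's two passes (in-place gap filling via slice assignment, then run detection over the mutated list) with one fused pass tracking chain-start/last-speech/pending-silence counters that emits segments directly and never mutates the input (return-value equivalence; B has no side effect on spoken_frames)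
import Mathlib
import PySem

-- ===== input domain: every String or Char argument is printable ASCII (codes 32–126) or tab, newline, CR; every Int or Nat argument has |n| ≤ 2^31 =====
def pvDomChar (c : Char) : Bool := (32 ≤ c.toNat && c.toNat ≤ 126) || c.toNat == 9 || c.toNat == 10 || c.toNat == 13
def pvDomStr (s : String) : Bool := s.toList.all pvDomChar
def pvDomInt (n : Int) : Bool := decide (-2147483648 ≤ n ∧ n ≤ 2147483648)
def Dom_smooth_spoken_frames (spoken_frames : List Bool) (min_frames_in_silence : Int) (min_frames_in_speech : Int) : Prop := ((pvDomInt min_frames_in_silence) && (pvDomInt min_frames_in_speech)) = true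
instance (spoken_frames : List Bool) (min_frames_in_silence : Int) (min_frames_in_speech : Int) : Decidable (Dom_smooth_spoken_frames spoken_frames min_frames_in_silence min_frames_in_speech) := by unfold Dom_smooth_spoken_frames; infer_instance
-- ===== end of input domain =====

-- B replaces A's two passes (in-place gap filling, then run detection) with one fused
-- counter-based pass that never mutates the input; equivalence is about the RETURN value
-- only (A mutates spoken_frames in place, B does not).

-- ===== PORT A =====
-- slice assignment frames[a:b] = [True]*(b-a); exact for 0 ≤ a ≤ b ≤ len (the only way A calls it)
def fillTrue (frames : List Bool) (a b : Int) : List Bool :=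
  frames.mapIdx (fun k x => if a ≤ (k : Int) ∧ (k : Int) < b then true else x)

-- body of A's first loop; frames[frame_ind] read as getD (frame_ind < len always holds)
def step1A (s : Int) (st : List Bool × Int) (i : Nat) : List Bool × Int :=
  if st.1.getD i false then
    (if 0 ≤ st.2 ∧ st.2 + 1 < (i : Int) then fillTrue st.1 (st.2 + 1) (i : Int) else st.1,
     (i : Int))
  else
    if 0 ≤ st.2 ∧ (i : Int) - st.2 > s then (st.1, -1) else st

-- body of A's second loop (acc, speech_start)
def step2A (fr : List Bool) (msp : Int) (st : List (Int × Int) × Int) (i : Nat) :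
    List (Int × Int) × Int :=
  if fr.getD i false then
    (st.1, if st.2 < 0 then (i : Int) else st.2)
  else
    if 0 ≤ st.2 then
      ((if (i : Int) - st.2 ≥ msp then st.1 ++ [(st.2, (i : Int))] else st.1), -1)
    else st

-- the trailing `if` after A's first loop
def fin1A (nI : Int) (r : List Bool × Int) : List Bool :=
  if 0 ≤ r.2 ∧ r.2 + 1 < nI then fillTrue r.1 (r.2 + 1) nI else r.1

-- the trailing `if` after A's second loop
def fin2A (msp nI : Int) (r : List (Int × Int) × Int) : List (Int × Int) :=
  if 0 ≤ r.2 ∧ nI - r.2 ≥ msp then r.1 ++ [(r.2, nI)] else r.1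

def smooth_spoken_frames (spoken_frames : List Bool) (min_frames_in_silence : Int)
    (min_frames_in_speech : Int) : List (Int × Int) :=
  let n := spoken_frames.length
  -- range(n_frames) ported as List.range n (n = len ≥ 0, exact)
  let fr2 := fin1A (n : Int)
    ((List.range n).foldl (step1A min_frames_in_silence) (spoken_frames, -1))
  fin2A min_frames_in_speech (n : Int)
    ((List.range n).foldl (step2A fr2 min_frames_in_speech) ([], -1))

-- ===== PORT B =====
-- single fused pass of Source B: state (i, chain_start, last_true, pending); yields become list appends
def altLoop (s msp : Int) : List Bool → Int → Int → Int → Int → List (Int × Int)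
  | [], i, cs, _lt, _p => if 0 ≤ cs ∧ i - cs ≥ msp then [(cs, i)] else []
  | v :: rest, i, cs, lt, p =>
    if v then
      altLoop s msp rest (i + 1) (if cs < 0 then i else cs) i 0
    else if 0 ≤ cs then
      if p + 1 > s then
        (if lt + 1 - cs ≥ msp then [(cs, lt + 1)] else []) ++
          altLoop s msp rest (i + 1) (-1) lt 0
      else altLoop s msp rest (i + 1) cs lt (p + 1)
    else altLoop s msp rest (i + 1) cs lt p

def smooth_spoken_frames_alt (spoken_frames : List Bool) (min_frames_in_silence : Int)
    (min_frames_in_speech : Int) : List (Int × Int) :=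
  altLoop min_frames_in_silence min_frames_in_speech spoken_frames 0 (-1) (-1) 0

-- ===== PRECONDITION & SPEC =====
def Spec_smooth_spoken_frames (spoken_frames : List Bool) (min_frames_in_silence : Int) (min_frames_in_speech : Int) (out : List (Int × Int)) : Prop := out = smooth_spoken_frames_alt spoken_frames min_frames_in_silence min_frames_in_speech
instance (spoken_frames : List Bool) (min_frames_in_silence : Int) (min_frames_in_speech : Int) (out : List (Int × Int)) : Decidable (Spec_smooth_spoken_frames spoken_frames min_frames_in_silence min_frames_in_speech out) := by unfold Spec_smooth_spoken_frames; infer_instance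

-- ===== CLAIM (what is proved, stated in full; the proofs are below) =====
def Claim_equal_smooth_spoken_frames : Prop := ∀ (spoken_frames : List Bool) (min_frames_in_silence : Int) (min_frames_in_speech : Int), Dom_smooth_spoken_frames spoken_frames min_frames_in_silence min_frames_in_speech → Spec_smooth_spoken_frames spoken_frames min_frames_in_silence min_frames_in_speech (smooth_spoken_frames spoken_frames min_frames_in_silence min_frames_in_speech)


-- ===== LEMMAS AND PROOFS =====

set_option maxHeartbeats 1000000

-- streaming reformulation of A's first pass: the committed prefix is final, `p` pending
-- silence frames follow the last speech frame of a live chain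
def sm (s : Int) : List Bool → Bool → Nat → List Bool
  | [], alive, p => if alive then List.replicate p true else List.replicate p false
  | v :: rest, alive, p =>
    if v then List.replicate p true ++ true :: sm s rest true 0
    else if alive then
      (if ((p : Int) + 1) > s then List.replicate (p + 1) false ++ sm s rest false 0
       else sm s rest true (p + 1))
    else false :: sm s rest false 0

-- structural reformulation of A's second pass
def seg (msp : Int) : List Bool → Int → Int → List (Int × Int)
  | [], i, st => if 0 ≤ st ∧ i - st ≥ msp then [(st, i)] else []
  | v :: rest, i, st =>
    if v then seg msp rest (i + 1) (if st < 0 then i else st)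
    else if 0 ≤ st then
      (if i - st ≥ msp then [(st, i)] else []) ++ seg msp rest (i + 1) (-1)
    else seg msp rest (i + 1) st

lemma sm_length (s : Int) : ∀ (rest : List Bool) (alive : Bool) (p : Nat),
    (alive = false → p = 0) →
    (sm s rest alive p).length = p + rest.length := by
  intro rest
  induction rest with
  | nil => intro alive p _; cases alive <;> simp [sm]
  | cons v rest ih =>
    intro alive p hd
    cases v with
    | true =>
      have h0 := ih true 0 (by simp)
      cases alive <;>
        · simp only [sm, eq_self_iff_true, if_true]
          simp [h0]
    | false =>
      cases alive with
      | false =>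
        have hp := hd rfl; subst hp
        simp only [sm, Bool.false_eq_true, if_false]
        simp [ih false 0 (fun _ => rfl)]
      | true =>
        simp only [sm, Bool.false_eq_true, if_false, eq_self_iff_true, if_true]
        split_ifs with h
        · simp [ih false 0 (fun _ => rfl)]
          omega
        · simp [ih true (p + 1) (by simp)]
          omega

lemma getD_mid (C : List Bool) (p : Nat) (b v : Bool) (D : List Bool) :
    (C ++ (List.replicate p b ++ v :: D)).getD (C.length + p) false = v := by
  induction C with
  | nil =>
    induction p with
    | zero => simp
    | succ p ihp => simpa [List.replicate_succ] using ihp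
  | cons a C ihC => simpa [Nat.succ_add] using ihC

lemma fillTrue_fill (C : List Bool) (p : Nat) (b : Bool) (D : List Bool) :
    fillTrue (C ++ (List.replicate p b ++ D)) (C.length) ((C.length : Int) + p)
      = C ++ (List.replicate p true ++ D) := by
  apply List.ext_getElem
  · simp [fillTrue]
  intro k h1 h2
  simp only [fillTrue] at h1 ⊢
  rw [List.getElem_mapIdx]
  by_cases hk : k < C.length
  · have hc : ¬ ((C.length : Int) ≤ (k : Int) ∧ (k : Int) < (C.length : Int) + p) := by
      push_cast; omega
    rw [if_neg hc, List.getElem_append_left hk, List.getElem_append_left hk]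
  · by_cases hk2 : k < C.length + p
    · have hc : (C.length : Int) ≤ (k : Int) ∧ (k : Int) < (C.length : Int) + p := by
        push_cast; omega
      rw [if_pos hc]
      have h3 : C.length ≤ k := by omega
      rw [List.getElem_append_right h3]
      have h4 : k - C.length < (List.replicate p true).length := by simp; omega
      rw [List.getElem_append_left h4, List.getElem_replicate]
    · have hc : ¬ ((C.length : Int) ≤ (k : Int) ∧ (k : Int) < (C.length : Int) + p) := by
        push_cast; omega
      rw [if_neg hc]
      have h3 : C.length ≤ k := by omega
      rw [List.getElem_append_right h3, List.getElem_append_right h3]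
      have h4 : (List.replicate p b).length ≤ k - C.length := by simp; omega
      have h5 : (List.replicate p true).length ≤ k - C.length := by simp; omega
      rw [List.getElem_append_right h4, List.getElem_append_right h5]
      simp

lemma inv1 (s : Int) (rest : List Bool) : ∀ (C : List Bool) (p : Nat) (alive : Bool),
    (alive = false → p = 0) → (alive = true → 1 ≤ C.length) →
    fin1A ((C.length + p + rest.length : Nat) : Int)
      ((List.range' (C.length + p) rest.length).foldl (step1A s)
        (C ++ (List.replicate p false ++ rest), cond alive ((C.length : Int) - 1) (-1)))
    = C ++ sm s rest alive p := by
  induction rest with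
  | nil =>
    intro C p alive hd ha
    cases alive with
    | false =>
      have hp := hd rfl; subst hp
      simp [fin1A, sm]
    | true =>
      have hc := ha rfl
      simp only [List.length_nil, List.range'_zero, List.foldl_nil, cond_true]
      cases p with
      | zero =>
        simp only [fin1A]
        rw [if_neg (by push_cast; omega)]
        simp [sm]
      | succ q =>
        simp only [fin1A]
        rw [if_pos (by push_cast; omega)]
        have e : (C.length : Int) - 1 + 1 = ((C.length : Nat) : Int) := by ring
        have e2 : ((C.length + (q + 1) + 0 : Nat) : Int) = (C.length : Int) + ((q + 1 : Nat) : Int) := by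
          push_cast; ring
        rw [e, e2]
        have hf := fillTrue_fill C (q + 1) false []
        simp only [List.append_nil] at hf ⊢
        rw [hf]
        simp [sm]
  | cons v rest ih =>
    intro C p alive hd ha
    have hpeel : List.range' (C.length + p) (v :: rest).length
        = (C.length + p) :: List.range' (C.length + p + 1) rest.length := by
      simp [List.range'_succ]
    rw [hpeel, List.foldl_cons]
    cases alive with
    | false =>
      have hp := hd rfl; subst hp
      cases v with
      | true =>
        have hstep : step1A s (C ++ (List.replicate 0 false ++ true :: rest),
            cond false ((C.length : Int) - 1) (-1)) (C.length + 0)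
            = (C ++ (List.replicate 0 false ++ true :: rest), ((C.length + 0 : Nat) : Int)) := by
          simp only [step1A, cond_false]
          rw [if_pos (by simpa using getD_mid C 0 false true rest)]
          rw [if_neg (by omega)]
        rw [hstep]
        have h := ih (C ++ [true]) 0 true (by simp) (by simp)
        simp only [cond_true] at h
        have e1 : (C ++ [true]) ++ (List.replicate 0 false ++ rest)
            = C ++ (List.replicate 0 false ++ true :: rest) := by simp
        have e2 : ((C ++ [true]).length : Int) - 1 = ((C.length + 0 : Nat) : Int) := by
          simp only [List.length_append, List.length_cons, List.length_nil]; omega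
        have e4 : (C ++ [true]).length + 0 + rest.length = C.length + 0 + (true :: rest).length := by
          simp only [List.length_append, List.length_cons, List.length_nil]; omega
        have e3 : (C ++ [true]).length + 0 = C.length + 0 + 1 := by
          simp only [List.length_append, List.length_cons, List.length_nil] <;> omega
        rw [e1, e2, e4, e3] at h
        rw [h]
        simp [sm]
      | false =>
        have hstep : step1A s (C ++ (List.replicate 0 false ++ false :: rest),
            cond false ((C.length : Int) - 1) (-1)) (C.length + 0)
            = (C ++ (List.replicate 0 false ++ false :: rest), -1) := by
          simp only [step1A, cond_false]
          rw [if_neg (by simpa using getD_mid C 0 false false rest)]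
          rw [if_neg (by omega)]
        rw [hstep]
        have h := ih (C ++ [false]) 0 false (fun _ => rfl) (by simp)
        simp only [cond_false] at h
        have e1 : (C ++ [false]) ++ (List.replicate 0 false ++ rest)
            = C ++ (List.replicate 0 false ++ false :: rest) := by simp
        have e4 : (C ++ [false]).length + 0 + rest.length = C.length + 0 + (false :: rest).length := by
          simp only [List.length_append, List.length_cons, List.length_nil]; omega
        have e3 : (C ++ [false]).length + 0 = C.length + 0 + 1 := by
          simp only [List.length_append, List.length_cons, List.length_nil] <;> omega
        rw [e1, e4, e3] at h
        rw [h]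
        simp [sm]
    | true =>
      have hc := ha rfl
      cases v with
      | true =>
        cases p with
        | zero =>
          have hstep : step1A s (C ++ (List.replicate 0 false ++ true :: rest),
              cond true ((C.length : Int) - 1) (-1)) (C.length + 0)
              = (C ++ (List.replicate 0 false ++ true :: rest), ((C.length + 0 : Nat) : Int)) := by
            simp only [step1A, cond_true]
            rw [if_pos (by simpa using getD_mid C 0 false true rest)]
            rw [if_neg (by push_cast; omega)]
          rw [hstep]
          have h := ih (C ++ [true]) 0 true (by simp) (by simp)
          simp only [cond_true] at h
          have e1 : (C ++ [true]) ++ (List.replicate 0 false ++ rest)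
              = C ++ (List.replicate 0 false ++ true :: rest) := by simp
          have e2 : ((C ++ [true]).length : Int) - 1 = ((C.length + 0 : Nat) : Int) := by
            simp only [List.length_append, List.length_cons, List.length_nil]; omega
          have e4 : (C ++ [true]).length + 0 + rest.length
              = C.length + 0 + (true :: rest).length := by
            simp only [List.length_append, List.length_cons, List.length_nil]; omega
          have e3 : (C ++ [true]).length + 0 = C.length + 0 + 1 := by
            simp only [List.length_append, List.length_cons, List.length_nil] <;> omega
          rw [e1, e2, e4, e3] at h
          rw [h]
          simp [sm]
        | succ q =>
          have hfill := fillTrue_fill C (q + 1) false (true :: rest)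
          have hstep : step1A s (C ++ (List.replicate (q + 1) false ++ true :: rest),
              cond true ((C.length : Int) - 1) (-1)) (C.length + (q + 1))
              = (C ++ (List.replicate (q + 1) true ++ true :: rest),
                 ((C.length + (q + 1) : Nat) : Int)) := by
            simp only [step1A, cond_true]
            rw [if_pos (by simpa using getD_mid C (q + 1) false true rest)]
            rw [if_pos (by push_cast; omega)]
            have e : (C.length : Int) - 1 + 1 = ((C.length : Nat) : Int) := by ring
            have e2 : ((C.length + (q + 1) : Nat) : Int)
                = (C.length : Int) + ((q + 1 : Nat) : Int) := by push_cast; ring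
            rw [e, e2, hfill]
          rw [hstep]
          have h := ih (C ++ (List.replicate (q + 1) true ++ [true])) 0 true (by simp)
            (by simp only [List.length_append, List.length_cons, List.length_nil,
                  List.length_replicate]; omega)
          simp only [cond_true] at h
          have e1 : (C ++ (List.replicate (q + 1) true ++ [true])) ++ (List.replicate 0 false ++ rest)
              = C ++ (List.replicate (q + 1) true ++ true :: rest) := by simp
          have e2 : ((C ++ (List.replicate (q + 1) true ++ [true])).length : Int) - 1
              = ((C.length + (q + 1) : Nat) : Int) := by
            simp only [List.length_append, List.length_cons, List.length_nil,
              List.length_replicate]; omega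
          have e4 : (C ++ (List.replicate (q + 1) true ++ [true])).length + 0 + rest.length
              = C.length + (q + 1) + (true :: rest).length := by
            simp only [List.length_append, List.length_cons, List.length_nil,
              List.length_replicate]; omega
          have e3 : (C ++ (List.replicate (q + 1) true ++ [true])).length + 0
              = C.length + (q + 1) + 1 := by
            simp only [List.length_append, List.length_cons, List.length_nil,
              List.length_replicate]; omega
          rw [e1, e2, e4, e3] at h
          rw [h]
          simp [sm, List.append_assoc]
      | false =>
        by_cases hs : ((p : Int) + 1) > s
        · have hstep : step1A s (C ++ (List.replicate p false ++ false :: rest),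
              cond true ((C.length : Int) - 1) (-1)) (C.length + p)
              = (C ++ (List.replicate p false ++ false :: rest), -1) := by
            simp only [step1A, cond_true]
            rw [if_neg (by simpa using getD_mid C p false false rest)]
            rw [if_pos (by push_cast at hs ⊢; omega)]
          rw [hstep]
          have h := ih (C ++ List.replicate (p + 1) false) 0 false (fun _ => rfl) (by simp)
          simp only [cond_false] at h
          have e1 : (C ++ List.replicate (p + 1) false) ++ (List.replicate 0 false ++ rest)
              = C ++ (List.replicate p false ++ false :: rest) := by
            simp [List.replicate_succ']
          have e4 : (C ++ List.replicate (p + 1) false).length + 0 + rest.length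
              = C.length + p + (false :: rest).length := by
            simp only [List.length_append, List.length_cons, List.length_nil,
              List.length_replicate]; omega
          have e3 : (C ++ List.replicate (p + 1) false).length + 0 = C.length + p + 1 := by
            simp only [List.length_append, List.length_cons, List.length_nil,
              List.length_replicate]; omega
          rw [e1, e4, e3] at h
          rw [h]
          simp only [sm, Bool.false_eq_true, if_false, eq_self_iff_true, if_true, if_pos hs]
          simp [List.append_assoc]
        · have hstep : step1A s (C ++ (List.replicate p false ++ false :: rest),
              cond true ((C.length : Int) - 1) (-1)) (C.length + p)
              = (C ++ (List.replicate p false ++ false :: rest), (C.length : Int) - 1) := by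
            simp only [step1A, cond_true]
            rw [if_neg (by simpa using getD_mid C p false false rest)]
            rw [if_neg (by push_cast at hs ⊢; omega)]
          rw [hstep]
          have h := ih C (p + 1) true (by simp) (fun _ => hc)
          simp only [cond_true] at h
          have e1 : C ++ (List.replicate (p + 1) false ++ rest)
              = C ++ (List.replicate p false ++ false :: rest) := by
            simp [List.replicate_succ']
          have e4 : C.length + (p + 1) + rest.length = C.length + p + (false :: rest).length := by
            simp only [List.length_cons]; omega
          have e3 : C.length + (p + 1) = C.length + p + 1 := by omega
          rw [e1, e4, e3] at h
          rw [h]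
          simp only [sm, Bool.false_eq_true, if_false, eq_self_iff_true, if_true, if_neg hs]

lemma inv2 (msp : Int) (rest : List Bool) : ∀ (C : List Bool) (acc : List (Int × Int)) (st : Int),
    fin2A msp (((C ++ rest).length : Nat) : Int)
      ((List.range' C.length rest.length).foldl (step2A (C ++ rest) msp) (acc, st))
    = acc ++ seg msp rest (C.length : Int) st := by
  induction rest with
  | nil =>
    intro C acc st
    simp only [List.length_nil, List.range'_zero, List.foldl_nil, fin2A, seg, List.append_nil]
    split_ifs with h
    · rfl
    · simp
  | cons v rest ih =>
    intro C acc st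
    have hpeel : List.range' C.length (v :: rest).length
        = C.length :: List.range' (C.length + 1) rest.length := by
      simp [List.range'_succ]
    rw [hpeel, List.foldl_cons]
    have hget : (C ++ v :: rest).getD C.length false = v := by
      simpa using getD_mid C 0 false v rest
    have hlen : (C ++ [v]).length = C.length + 1 := by simp
    have hcast : ((C.length + 1 : Nat) : Int) = (C.length : Int) + 1 := by push_cast; ring
    cases v with
    | true =>
      have hstep : step2A (C ++ true :: rest) msp (acc, st) C.length
          = (acc, if st < 0 then ((C.length : Nat) : Int) else st) := by
        simp only [step2A]
        rw [if_pos hget]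
      rw [hstep]
      have h := ih (C ++ [true]) acc (if st < 0 then ((C.length : Nat) : Int) else st)
      rw [hlen, hcast] at h
      rw [show ((C ++ [true]) ++ rest : List Bool) = C ++ true :: rest from by simp] at h
      rw [h]
      simp only [seg, eq_self_iff_true, if_true]
    | false =>
      by_cases hst : 0 ≤ st
      · have hstep : step2A (C ++ false :: rest) msp (acc, st) C.length
            = ((if ((C.length : Nat) : Int) - st ≥ msp then acc ++ [(st, ((C.length : Nat) : Int))] else acc), -1) := by
          simp only [step2A]
          rw [if_neg (by simp [hget])]
          rw [if_pos hst]
        rw [hstep]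
        have h := ih (C ++ [false])
          (if ((C.length : Nat) : Int) - st ≥ msp then acc ++ [(st, ((C.length : Nat) : Int))] else acc) (-1)
        rw [hlen, hcast] at h
        rw [show ((C ++ [false]) ++ rest : List Bool) = C ++ false :: rest from by simp] at h
        rw [h]
        simp only [seg, Bool.false_eq_true, if_false, if_pos hst]
        split_ifs with hm
        · simp
        · simp
      · have hstep : step2A (C ++ false :: rest) msp (acc, st) C.length
            = (acc, st) := by
          simp only [step2A]
          rw [if_neg (by simp [hget])]
          rw [if_neg hst]
        rw [hstep]
        have h := ih (C ++ [false]) acc st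
        rw [hlen, hcast] at h
        rw [show ((C ++ [false]) ++ rest : List Bool) = C ++ false :: rest from by simp] at h
        rw [h]
        simp only [seg, Bool.false_eq_true, if_false, if_neg hst]

lemma seg_replicate_true (msp : Int) (k : Nat) : ∀ (L : List Bool) (j st : Int), 0 ≤ st →
    seg msp (List.replicate k true ++ L) j st = seg msp L (j + k) st := by
  induction k with
  | zero => intro L j st h; simp
  | succ k ih =>
    intro L j st h
    rw [List.replicate_succ]
    simp only [List.cons_append, seg, eq_self_iff_true, if_true]
    rw [if_neg (by omega)]
    rw [ih L (j + 1) st h]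
    congr 1
    push_cast; ring

lemma seg_replicate_false (msp : Int) (k : Nat) : ∀ (L : List Bool) (j st : Int), st < 0 →
    seg msp (List.replicate k false ++ L) j st = seg msp L (j + k) st := by
  induction k with
  | zero => intro L j st h; simp
  | succ k ih =>
    intro L j st h
    rw [List.replicate_succ]
    simp only [List.cons_append, seg, Bool.false_eq_true, if_false]
    rw [if_neg (by omega)]
    rw [ih L (j + 1) st h]
    congr 1
    push_cast; ring

lemma seg_sm_altLoop (s msp : Int) (rest : List Bool) : ∀ (i p : Nat) (cs lt : Int),
    (0 ≤ cs → lt = (i : Int) - p - 1) → (cs < 0 → cs = -1 ∧ p = 0) →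
    seg msp (sm s rest (decide (0 ≤ cs)) p) ((i : Int) - p) cs
      = altLoop s msp rest (i : Int) cs lt p := by
  induction rest with
  | nil =>
    intro i p cs lt h1 h2
    by_cases hcs : 0 ≤ cs
    · rw [decide_eq_true hcs]
      simp only [sm, if_true, altLoop]
      rw [← List.append_nil (List.replicate p true)]
      rw [seg_replicate_true msp p [] ((i : Int) - p) cs hcs]
      simp only [seg]
      have e : (i : Int) - p + p = (i : Int) := by ring
      rw [e]
    · rw [decide_eq_false hcs]
      obtain ⟨hc1, hc2⟩ := h2 (by omega)
      subst hc1; subst hc2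
      simp only [sm, Bool.false_eq_true, if_false, List.replicate_zero, seg, altLoop,
        Nat.cast_zero, sub_zero]
  | cons v rest ih =>
    intro i p cs lt h1 h2
    by_cases hcs : 0 ≤ cs
    · rw [decide_eq_true hcs]
      cases v with
      | true =>
        simp only [sm, if_true]
        rw [seg_replicate_true msp p _ ((i : Int) - p) cs hcs]
        have e : (i : Int) - p + p = (i : Int) := by ring
        rw [e]
        simp only [seg, if_true]
        rw [if_neg (by omega)]
        have h := ih (i + 1) 0 cs ((i : Int)) (fun _ => by push_cast; ring) (by omega)
        rw [decide_eq_true hcs] at h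
        have e2 : ((i + 1 : Nat) : Int) - ((0 : Nat) : Int) = (i : Int) + 1 := by push_cast; ring
        rw [e2] at h
        push_cast at h ⊢
        rw [h]
        simp only [altLoop, if_true]
        rw [if_neg (by omega)]
      | false =>
        simp only [sm, Bool.false_eq_true, if_false, if_true]
        by_cases hs : ((p : Int) + 1) > s
        · rw [if_pos hs]
          have hlt := h1 hcs
          simp only [List.replicate_succ, List.cons_append, seg, Bool.false_eq_true, if_false,
            if_pos hcs]
          rw [seg_replicate_false msp p _ ((i : Int) - p + 1) (-1) (by omega)]
          have h := ih (i + 1) 0 (-1) lt (by omega) (fun _ => ⟨rfl, rfl⟩)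
          rw [show decide (0 ≤ (-1 : Int)) = false from by decide] at h
          have e2 : ((i + 1 : Nat) : Int) - ((0 : Nat) : Int) = (i : Int) - p + 1 + p := by
            push_cast; ring
          rw [e2] at h
          push_cast at h ⊢
          rw [h]
          simp only [altLoop, Bool.false_eq_true, if_false, if_pos hcs, if_pos hs]
          rw [show (i : Int) - p = lt + 1 from by omega]
        · rw [if_neg hs]
          have h := ih (i + 1) (p + 1) cs lt
            (fun hc => by have := h1 hc; push_cast; push_cast at this; omega) (by omega)
          rw [decide_eq_true hcs] at h
          have e2 : ((i + 1 : Nat) : Int) - ((p + 1 : Nat) : Int) = (i : Int) - p := by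
            push_cast; ring
          rw [e2] at h
          push_cast at h ⊢
          rw [h]
          simp only [altLoop, Bool.false_eq_true, if_false, if_pos hcs]
          rw [if_neg (by push_cast; push_cast at hs; omega)]
    · rw [decide_eq_false hcs]
      obtain ⟨hc1, hc2⟩ := h2 (by omega)
      subst hc1; subst hc2
      cases v with
      | true =>
        simp only [sm, if_true, List.replicate_zero, List.nil_append,
          Nat.cast_zero, sub_zero]
        simp only [seg, if_true]
        rw [if_pos (by omega)]
        have h := ih (i + 1) 0 ((i : Int)) ((i : Int)) (fun _ => by push_cast; ring)
          (by omega)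
        rw [show decide (0 ≤ (i : Int)) = true from by simp] at h
        have e2 : ((i + 1 : Nat) : Int) - ((0 : Nat) : Int) = (i : Int) + 1 := by push_cast; ring
        rw [e2] at h
        push_cast at h ⊢
        rw [h]
        simp only [altLoop, if_true]
        rw [if_pos (by omega)]
      | false =>
        simp only [sm, Bool.false_eq_true, if_false, Nat.cast_zero, sub_zero]
        simp only [seg, Bool.false_eq_true, if_false]
        rw [if_neg (by omega)]
        have h := ih (i + 1) 0 (-1) lt (by omega) (fun _ => ⟨rfl, rfl⟩)
        rw [show decide (0 ≤ (-1 : Int)) = false from by decide] at h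
        have e2 : ((i + 1 : Nat) : Int) - ((0 : Nat) : Int) = (i : Int) + 1 := by push_cast; ring
        rw [e2] at h
        push_cast at h ⊢
        rw [h]
        simp only [altLoop, Bool.false_eq_true, if_false]
        rw [if_neg (by omega)]

-- ===== VERDICT (by name: the statement is the Claim_ definition above) =====
theorem smooth_spoken_frames_spec : Claim_equal_smooth_spoken_frames := by
  intro xs s msp _
  unfold Spec_smooth_spoken_frames
  simp only [smooth_spoken_frames, smooth_spoken_frames_alt]
  rw [List.range_eq_range']
  have h1 := inv1 s xs [] 0 false (fun _ => rfl) (by simp)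
  simp only [List.length_nil, Nat.zero_add, Nat.add_zero, List.nil_append,
    List.replicate_zero, cond_false] at h1
  rw [h1]
  have hlen : (sm s xs false 0).length = xs.length := by
    simpa using sm_length s xs false 0 (fun _ => rfl)
  have h2 := inv2 msp (sm s xs false 0) [] [] (-1)
  simp only [List.nil_append, List.length_nil, Nat.cast_zero, hlen] at h2
  rw [h2]
  have h3 := seg_sm_altLoop s msp xs 0 0 (-1) (-1)
    (fun h => absurd h (by norm_num)) (fun _ => ⟨rfl, rfl⟩)
  simp only [Nat.cast_zero, sub_zero,
    show decide (0 ≤ (-1 : Int)) = false from by decide] at h3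
  rw [h3]
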